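-- pv_equiv track=rewrite | github.com/wikimedia/wikimedia-discovery-relevanceForge | relforge/cli/engineScore.py | calc_mpc
-- ===== SOURCE A (Python) =====
-- from collections import Counter, defaultdict
--
-- def calc_mpc(queries):
--     votes = defaultdict(Counter)
--     for query, page_ids in queries.items():
--         for i in range(len(query)):
--             prefix = query[:i + 1]
--             votes[prefix].update(page_ids)
--     results = {}
--     for prefix, counts in votes.items():
--         # TODO: Elements with equal counts are ordered arbitrarily. Not sure
--         # what is appropriate to do here.
--         results[prefix] = {page_id: i for i, (page_id, count) in enumerate(counts.most_common(), 1)}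
--     return results
-- ===== SOURCE B (Python) =====
-- def calc_mpc(queries):
--     # Per-prefix recount instead of incremental accumulation: list the distinct
--     # prefixes once, then for each prefix rescan the queries that start with it,
--     # and rank page_ids by a counting (bucket) pass instead of a comparison sort.
--     items = list(queries.items())
--     prefixes = list(dict.fromkeys(
--         q[:i + 1] for q, _ in items for i in range(len(q))))
--     results = {}
--     for prefix in prefixes:
--         counts = {}
--         for query, page_ids in items:
--             if query.startswith(prefix):
--                 for pid in page_ids:
--                     counts[pid] = counts.get(pid, 0) + 1
--         buckets = {}
--         for pid, c in counts.items():
--             buckets.setdefault(c, []).append(pid)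
--         ranking = {}
--         rank = 1
--         for c in sorted(buckets, reverse=True):
--             for pid in buckets[c]:
--                 ranking[pid] = rank
--                 rank += 1
--         results[prefix] = ranking
--     return results
-- ===== Notes on version B (the rewrite author's own statement) =====
-- stated objective: alternative
-- what changed: B keeps no votes accumulator at all: it lists the distinct prefixes once, recomputes each prefix's counts by rescanning the queries with startswith, and ranks by a counting/bucket pass (group page_ids by their count, emit buckets in descending count order with a running rank) instead of sorting the counter items; it trades A's single accumulation pass for per-prefix rescans, so it is slower on large query sets.
import Mathlib
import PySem

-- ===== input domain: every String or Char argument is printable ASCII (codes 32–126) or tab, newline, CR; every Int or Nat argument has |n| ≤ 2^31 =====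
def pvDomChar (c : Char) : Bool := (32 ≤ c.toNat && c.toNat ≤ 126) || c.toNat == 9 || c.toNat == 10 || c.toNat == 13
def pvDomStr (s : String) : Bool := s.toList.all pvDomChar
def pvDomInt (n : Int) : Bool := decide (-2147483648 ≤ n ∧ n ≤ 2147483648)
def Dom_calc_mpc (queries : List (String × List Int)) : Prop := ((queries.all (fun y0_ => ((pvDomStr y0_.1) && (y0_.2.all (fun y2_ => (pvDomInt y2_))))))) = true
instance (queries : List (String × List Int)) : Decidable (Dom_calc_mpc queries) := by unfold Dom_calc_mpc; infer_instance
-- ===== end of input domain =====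

-- B keeps no votes accumulator: it lists the distinct prefixes once, recounts each
-- prefix by rescanning the queries with startswith, and ranks with a counting/bucket
-- pass over descending counts instead of sorting (objective: alternative; trades A's
-- single accumulation pass for per-prefix rescans, so B is slower on large inputs).

-- ===== PORT A =====
-- votes = defaultdict(Counter): votes[prefix].update(page_ids) is modify with default
-- empty and a per-element counter fold; counts.most_common() is sorted(items, key=snd,
-- reverse=True); dicts are built by folds of insert and returned as .items.
def calc_mpc (queries : List (String × List Int)) : List (String × List (Int × Int)) :=
  let votes : PySem.Dict String (PySem.Dict Int Int) :=
    queries.foldl (fun votes qp =>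
      (PySem.List.pyRange 0 (PySem.Str.len qp.1) 1).foldl (fun votes i =>
        votes.modify (PySem.Str.slice qp.1 none (some (i + 1))) PySem.Dict.empty
          (fun c => qp.2.foldl (fun c p => c.modify p 0 (· + 1)) c)) votes)
      PySem.Dict.empty
  let results : PySem.Dict String (PySem.Dict Int Int) :=
    votes.items.foldl (fun res pc =>
      res.insert pc.1
        ((PySem.List.enumerate (PySem.List.sorted pc.2.items (fun p => p.2) true) 1).foldl
          (fun d ip => d.insert ip.2.1 ip.1) PySem.Dict.empty)) PySem.Dict.empty
  results.items.map (fun p => (p.1, p.2.items))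

-- ===== PORT B =====
-- Literal port of Source B: 'list(dict.fromkeys(generator))' is dedup of the flatMap of
-- per-query prefixes; the per-prefix loop guards with startswith and counts with
-- get(pid, 0) + 1 (insert/getD); buckets is setdefault-append (modify with default []);
-- the ranking loop threads the dict together with the running rank counter.
def calc_mpc_alt (queries : List (String × List Int)) : List (String × List (Int × Int)) :=
  let prefixes : List String :=
    PySem.List.dedup (queries.flatMap (fun qp =>
      (PySem.List.pyRange 0 (PySem.Str.len qp.1) 1).map
        (fun i => PySem.Str.slice qp.1 none (some (i + 1)))))
  let results : PySem.Dict String (PySem.Dict Int Int) :=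
    prefixes.foldl (fun results pfx =>
      let counts : PySem.Dict Int Int :=
        queries.foldl (fun counts qp =>
          if PySem.Str.startswith qp.1 pfx then
            qp.2.foldl (fun c pid => c.insert pid (c.getD pid 0 + 1)) counts
          else counts) PySem.Dict.empty
      let buckets : PySem.Dict Int (List Int) :=
        counts.items.foldl (fun b pc => b.modify pc.2 [] (fun g => g ++ [pc.1]))
          PySem.Dict.empty
      let ranking : PySem.Dict Int Int :=
        ((PySem.List.sorted buckets.keys (fun c => c) true).foldl
          (fun (st : PySem.Dict Int Int × Int) cnt =>
            (buckets.getD cnt []).foldl (fun st pid => (st.1.insert pid st.2, st.2 + 1)) st)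
          (PySem.Dict.empty, 1)).1
      results.insert pfx ranking) PySem.Dict.empty
  results.items.map (fun p => (p.1, p.2.items))

-- ===== PRECONDITION & SPEC =====
def Spec_calc_mpc (queries : List (String × List Int)) (out : List (String × List (Int × Int))) : Prop := out = calc_mpc_alt queries
instance (queries : List (String × List Int)) (out : List (String × List (Int × Int))) : Decidable (Spec_calc_mpc queries out) := by unfold Spec_calc_mpc; infer_instance

-- ===== CLAIM (what is proved, stated in full; the proofs are below) =====
def Claim_equal_calc_mpc : Prop := ∀ (queries : List (String × List Int)), Dom_calc_mpc queries → Spec_calc_mpc queries (calc_mpc queries)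

-- ===== LEMMAS AND PROOFS =====

-- map a value transformation over a dict's items (keeps keys and their order)
def pvMapVal {κ ν ν' : Type} (g : ν → ν') (d : PySem.Dict κ ν) : PySem.Dict κ ν' :=
  PySem.Dict.mk (d.items.map (fun p => (p.1, g p.2)))

-- A's counter for one prefix, computed from the bucket of page-id lists voting for it
def pvCnt (gs : List (List Int)) : PySem.Dict Int Int :=
  gs.foldl (fun c pids => pids.foldl (fun c p => c.modify p 0 (· + 1)) c) PySem.Dict.empty

-- the per-query stream of (prefix, page_ids) vote events, and the whole stream
def pvEvents (queries : List (String × List Int)) : List (String × List Int) :=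
  queries.flatMap (fun qp =>
    (PySem.List.pyRange 0 (PySem.Str.len qp.1) 1).map
      (fun i => (PySem.Str.slice qp.1 none (some (i + 1)), qp.2)))

theorem pvMapVal_keys {κ ν ν' : Type} (g : ν → ν') (d : PySem.Dict κ ν) :
    (pvMapVal g d).keys = d.keys := by
  simp [pvMapVal, PySem.Dict.keys]

theorem pvMapVal_contains {κ ν ν' : Type} [BEq κ] (g : ν → ν') (d : PySem.Dict κ ν) (k : κ) :
    (pvMapVal g d).contains k = d.contains k := by
  simp [pvMapVal, PySem.Dict.contains, List.any_map, Function.comp_def]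

theorem pvMapVal_get? {κ ν ν' : Type} [BEq κ] (g : ν → ν') (d : PySem.Dict κ ν) (k : κ) :
    (pvMapVal g d).get? k = (d.get? k).map g := by
  simp [pvMapVal, PySem.Dict.get?, List.find?_map, Function.comp_def, Option.map_map]

theorem cnt_append (gs : List (List Int)) (pids : List Int) :
    pvCnt (gs ++ [pids]) = pids.foldl (fun c p => c.modify p 0 (· + 1)) (pvCnt gs) := by
  simp [pvCnt, List.foldl_append]

-- the φ-invariant step: a bucket-append transported by pvCnt is A's counter update
theorem mapVal_cnt_modify (b : PySem.Dict String (List (List Int))) (k : String) (pids : List Int) :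
    pvMapVal pvCnt (b.modify k [] (fun g => g ++ [pids]))
      = (pvMapVal pvCnt b).modify k PySem.Dict.empty
          (fun c => pids.foldl (fun c p => c.modify p 0 (· + 1)) c) := by
  by_cases h : b.contains k = true
  · obtain ⟨v, hv⟩ : ∃ v, b.get? k = some v := by
      rw [PySem.Dict.contains_eq_isSome_get?] at h
      exact Option.isSome_iff_exists.mp h
    have hbd : b.getD k [] = v := by simp [PySem.Dict.getD, hv]
    have hφd : (pvMapVal pvCnt b).getD k PySem.Dict.empty = pvCnt v := by
      simp [PySem.Dict.getD, pvMapVal_get?, hv]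
    show pvMapVal pvCnt (b.insert k (b.getD k [] ++ [pids]))
        = (pvMapVal pvCnt b).insert k
            (pids.foldl (fun c p => c.modify p 0 (· + 1)) ((pvMapVal pvCnt b).getD k PySem.Dict.empty))
    rw [hbd, hφd, ← cnt_append]
    apply PySem.Dict.ext
    rw [PySem.Dict.items_insert_of_contains (pvMapVal pvCnt b) _ (by rw [pvMapVal_contains]; exact h)]
    show ((b.insert k (v ++ [pids])).items.map (fun p => (p.1, pvCnt p.2))) = _
    rw [PySem.Dict.items_insert_of_contains b _ h]
    simp only [pvMapVal, List.map_map]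
    apply List.map_congr_left
    intro p _
    by_cases hp : p.1 = k <;> simp [hp]
  · have h' : b.contains k = false := by simpa using h
    show pvMapVal pvCnt (b.insert k (b.getD k [] ++ [pids]))
        = (pvMapVal pvCnt b).insert k
            (pids.foldl (fun c p => c.modify p 0 (· + 1)) ((pvMapVal pvCnt b).getD k PySem.Dict.empty))
    rw [PySem.Dict.getD_of_not_contains _ _ h',
        PySem.Dict.getD_of_not_contains _ _ (by rw [pvMapVal_contains]; exact h')]
    apply PySem.Dict.ext
    rw [PySem.Dict.items_insert_of_not_contains _ _ (by rw [pvMapVal_contains]; exact h')]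
    simp only [pvMapVal]
    rw [PySem.Dict.items_insert_of_not_contains _ _ h']
    simp [pvCnt]

-- the φ-invariant over a whole event stream
theorem mapVal_cnt_foldl (E : List (String × List Int)) (b : PySem.Dict String (List (List Int))) :
    E.foldl (fun v e => v.modify e.1 PySem.Dict.empty
        (fun c => e.2.foldl (fun c p => c.modify p 0 (· + 1)) c)) (pvMapVal pvCnt b)
      = pvMapVal pvCnt (E.foldl (fun b e => b.modify e.1 [] (fun g => g ++ [e.2])) b) := by
  induction E generalizing b with
  | nil => rfl
  | cons e E ih => simp only [List.foldl_cons, ← mapVal_cnt_modify, ih]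

theorem enumerate_map {α β : Type} (f : α → β) (l : List α) (s : Int) :
    PySem.List.enumerate (l.map f) s = (PySem.List.enumerate l s).map (fun p => (p.1, f p.2)) := by
  induction l generalizing s with
  | nil => rfl
  | cons x l ih => simp [PySem.List.enumerate_cons, ih]

theorem cnt_keys_nodup (gs : List (List Int)) : (pvCnt gs).keys.Nodup := by
  have h : ∀ (c : PySem.Dict Int Int), c.keys.Nodup →
      (gs.foldl (fun c pids => pids.foldl (fun c p => c.modify p 0 (· + 1)) c) c).keys.Nodup := by
    induction gs with
    | nil => intro c hc; exact hc
    | cons g gs ih =>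
        intro c hc
        exact ih _ (PySem.Dict.nodup_keys_foldl_modify_key g (fun p => p) 0 (fun _ _ v => v + 1) c hc)
  exact h PySem.Dict.empty PySem.Dict.nodup_keys_empty

-- a fold of inserts with distinct fresh keys builds exactly the mapped item list
theorem foldl_insert_items {κ ν ν' : Type} [BEq κ] [LawfulBEq κ]
    (l : List (κ × ν)) (F : κ × ν → ν') (h : (l.map (fun p => p.1)).Nodup) :
    (l.foldl (fun res pc => res.insert pc.1 (F pc)) PySem.Dict.empty).items
      = l.map (fun pc => (pc.1, F pc)) := by
  simpa using PySem.Dict.items_foldl_insert_fresh l (fun pc => pc.1) F PySem.Dict.empty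
    (fun a _ => PySem.Dict.contains_empty a.1) h

-- a fold of inserts over a nodup key list builds exactly the mapped item list
theorem foldl_insert_items_key {κ ν' : Type} [BEq κ] [LawfulBEq κ]
    (l : List κ) (F : κ → ν') (h : l.Nodup) :
    (l.foldl (fun res k => res.insert k (F k)) PySem.Dict.empty).items
      = l.map (fun k => (k, F k)) := by
  simpa using PySem.Dict.items_foldl_insert_fresh l (fun k => k) F PySem.Dict.empty
    (fun a _ => PySem.Dict.contains_empty a) (by simpa using h)

-- flatMap respects pointwise-equal functions
theorem flatMap_congr {α β : Type} (l : List α) (f g : α → List β)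
    (h : ∀ x ∈ l, f x = g x) : l.flatMap f = l.flatMap g := by
  induction l with
  | nil => rfl
  | cons x l ih =>
      simp only [List.flatMap_cons, h x (List.mem_cons_self), ih (fun y hy => h y (List.mem_cons_of_mem _ hy))]

-- flatMap of a singleton-or-nil body is map-after-filter
theorem flatMap_if_singleton {α β : Type} (l : List α) (p : α → Bool) (f : α → β) :
    l.flatMap (fun x => if p x then [f x] else []) = (l.filter p).map f := by
  induction l with
  | nil => rfl
  | cons x l ih => by_cases h : p x <;> simp [h, ih]

-- filter (· == k) on range n keeps exactly k
theorem filter_range_eq (n k : Nat) (hk : k < n) :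
    (List.range n).filter (fun j => j == k) = [k] := by
  induction n with
  | zero => omega
  | succ n ih =>
      rw [List.range_succ, List.filter_append]
      by_cases h : k < n
      · rw [ih h]
        have hne : (n == k) = false := beq_eq_false_iff_ne.mpr (by omega)
        simp [hne]
      · have hkn : k = n := by omega
        subst hkn
        have h1 : (List.range k).filter (fun j => j == k) = [] :=
          List.filter_eq_nil_iff.mpr (fun j hj => by
            have := List.mem_range.mp hj
            simp only [ne_eq]
            simpa using (by omega : ¬ j = k))
        simp [h1]

-- the only i in range(len(q)) with q[:i+1] == p is i = len(p) - 1, iff q starts with p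
theorem per_query_filter (q p : String) (v : List Int) (hp : p.toList ≠ []) :
    ((PySem.List.pyRange 0 (PySem.Str.len q) 1).map
        (fun i => (PySem.Str.slice q none (some (i + 1)), v))).filter (fun e => e.1 == p)
      = if PySem.Str.startswith q p then [(p, v)] else [] := by
  have hlen : PySem.Str.len q = ((q.toList.length : Nat) : Int) := rfl
  rw [hlen, PySem.List.pyRange_zero_nat, List.map_map, List.filter_map]
  have hsl : ∀ j : Nat, PySem.Str.slice q none (some ((j : Int) + 1)) = p ↔
      q.toList.take (j + 1) = p.toList := by
    intro j
    rw [← String.toList_inj, PySem.Str.toList_slice, PySem.Chars.slice_eq_listSlice]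
    have : ((j : Int) + 1) = ((j + 1 : Nat) : Int) := by push_cast; ring
    rw [this, PySem.List.slice_to_natCast]
  have hpred : ∀ j : Nat,
      ((fun e => e.1 == p) ∘ ((fun i => (PySem.Str.slice q none (some (i + 1)), v)) ∘ (fun k : Nat => (k : Int)))) j
        = decide (q.toList.take (j + 1) = p.toList) := by
    intro j
    simp only [Function.comp_def]
    by_cases h : q.toList.take (j + 1) = p.toList
    · simp [h, (hsl j).mpr h]
    · have : ¬ (PySem.Str.slice q none (some ((j : Int) + 1)) = p) := fun hc => h ((hsl j).mp hc)
      simp [h, this]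
  rw [List.filter_congr (fun j _ => hpred j)]
  by_cases hsw : PySem.Str.startswith q p = true
  · have hpre : p.toList <+: q.toList := by
      rw [PySem.Str.startswith_eq] at hsw
      exact (PySem.Chars.startswith_iff _ _).mp hsw
    have hple : p.toList.length ≤ q.toList.length := hpre.length_le
    have hppos : 0 < p.toList.length := List.length_pos_iff.mpr hp
    have hcond : ∀ j ∈ List.range q.toList.length,
        decide (q.toList.take (j + 1) = p.toList) = (j == p.toList.length - 1) := by
      intro j hj
      have hjn := List.mem_range.mp hj
      by_cases h : j = p.toList.length - 1
      · subst h
        have h1 : p.toList.length - 1 + 1 = p.toList.length := by omega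
        have h2 : q.toList.take (p.toList.length - 1 + 1) = p.toList := by
          rw [h1]; exact (List.prefix_iff_eq_take.mp hpre).symm
        rw [decide_eq_true h2]
        exact (beq_self_eq_true _).symm
      · have h2 : ¬ (q.toList.take (j + 1) = p.toList) := by
          intro hc
          have : (q.toList.take (j + 1)).length = p.toList.length := by rw [hc]
          rw [List.length_take] at this
          omega
        rw [decide_eq_false h2]
        exact (beq_eq_false_iff_ne.mpr h).symm
    rw [List.filter_congr hcond, filter_range_eq _ _ (by omega)]
    have hk : q.toList.take (p.toList.length - 1 + 1) = p.toList := by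
      have h1 : p.toList.length - 1 + 1 = p.toList.length := by omega
      rw [h1]; exact (List.prefix_iff_eq_take.mp hpre).symm
    have hqs : PySem.Str.slice q none (some (((p.toList.length - 1 : Nat) : Int) + 1)) = p :=
      (hsl _).mpr hk
    rw [List.map_cons, List.map_nil, if_pos hsw]
    simp only [Function.comp_def]
    rw [hqs]
  · have hsw' : PySem.Str.startswith q p = false := by simpa using hsw
    have h1 : (List.range q.toList.length).filter
        (fun j => decide (q.toList.take (j + 1) = p.toList)) = [] := by
      rw [List.filter_eq_nil_iff]
      intro j _
      simp only [decide_eq_true_eq]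
      intro hc
      have : p.toList <+: q.toList := hc ▸ List.take_prefix _ _
      rw [PySem.Str.startswith_eq] at hsw'
      have := (PySem.Chars.startswith_iff q.toList p.toList).mpr this
      rw [hsw'] at this
      exact absurd this (by simp)
    rw [h1, List.map_nil, if_neg hsw]

-- every prefix in the event stream is nonempty
theorem mem_prefixes_ne (queries : List (String × List Int)) (p : String)
    (hp : p ∈ PySem.List.dedup ((pvEvents queries).map (fun e => e.1))) : p.toList ≠ [] := by
  rw [PySem.List.dedup_eq_ofList, PySem.Set.mem_ofList] at hp
  obtain ⟨e, he, rfl⟩ := List.mem_map.mp hp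
  obtain ⟨qp, _, hev⟩ := List.mem_flatMap.mp he
  obtain ⟨i, hi, rfl⟩ := List.mem_map.mp hev
  obtain ⟨hi0, hilt⟩ := PySem.List.mem_pyRange_one.mp hi
  simp only [PySem.Str.toList_slice, PySem.Chars.slice_eq_listSlice]
  rw [PySem.List.slice_to qp.1.toList (by omega : (0 : Int) ≤ i + 1)]
  have hilt' : i < ((qp.1.toList.length : Nat) : Int) := hilt
  intro hc
  have hlen2 := congrArg List.length hc
  rw [List.length_take] at hlen2
  simp only [List.length_nil] at hlen2
  omega

-- B's per-prefix rescan computes A's accumulated counter for that prefix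
theorem counts_eq (queries : List (String × List Int)) (p : String) (hp : p.toList ≠ []) :
    queries.foldl (fun counts qp =>
        if PySem.Str.startswith qp.1 p then
          qp.2.foldl (fun c pid => c.insert pid (c.getD pid 0 + 1)) counts
        else counts) PySem.Dict.empty
      = pvCnt (((pvEvents queries).filter (fun e => e.1 == p)).map (fun e => e.2)) := by
  have h1 : (pvEvents queries).filter (fun e => e.1 == p)
      = (queries.filter (fun qp => PySem.Str.startswith qp.1 p)).map (fun qp => (p, qp.2)) := by
    rw [pvEvents, List.filter_flatMap]
    rw [flatMap_congr _ _ (fun qp => if PySem.Str.startswith qp.1 p then [(p, qp.2)] else [])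
      (fun qp _ => per_query_filter qp.1 p qp.2 hp)]
    exact flatMap_if_singleton _ _ _
  rw [h1, List.map_map, pvCnt]
  have h2 : (List.map ((fun e => e.2) ∘ (fun qp => (p, qp.2)))
        (queries.filter (fun qp => PySem.Str.startswith qp.1 p)))
      = (queries.filter (fun qp => PySem.Str.startswith qp.1 p)).map (fun qp => qp.2) := rfl
  rw [h2, List.foldl_map, ← PySem.List.foldl_if_eq_foldl_filter]
  simp only [PySem.Dict.modify]

-- insertBy skips a block it does not go before
theorem insertBy_append_skip {α : Type} (before : α → α → Bool) (x : α) (ys zs : List α)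
    (h : ∀ y ∈ ys, before x y = false) :
    PySem.List.insertBy before x (ys ++ zs) = ys ++ PySem.List.insertBy before x zs := by
  induction ys with
  | nil => rfl
  | cons y ys ih =>
      simp only [List.cons_append, PySem.List.insertBy, h y (List.mem_cons_self)]
      simp only [Bool.false_eq_true, if_false, List.cons.injEq, true_and]
      exact ih (fun y' hy' => h y' (List.mem_cons_of_mem _ hy'))

-- insertBy goes in front when it goes before the head (or the list is empty)
theorem insertBy_front {α : Type} (before : α → α → Bool) (x : α) (l : List α)
    (h : ∀ y, l.head? = some y → before x y = true) :
    PySem.List.insertBy before x l = x :: l := by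
  cases l with
  | nil => rfl
  | cons y ys => simp [PySem.List.insertBy, h y rfl]

-- inserting x into a concatenation of strictly-descending nonempty key-buckets
-- appends x at the end of its own bucket (creating the bucket if missing)
theorem insertBy_flatMap {α : Type} (k : α → Int) (x : α) (C : List Int)
    (hC : C.Pairwise (fun a b => b < a)) (B : Int → List α)
    (hB : ∀ c ∈ C, ∀ y ∈ B c, k y = c) (hne : ∀ c ∈ C, B c ≠ [])
    (hemp : k x ∉ C → B (k x) = []) :
    PySem.List.insertBy (fun a b => decide (k b < k a)) x (C.flatMap B)
      = (if k x ∈ C then C else PySem.List.insertBy (fun a b => decide (b < a)) (k x) C).flatMap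
          (fun c => if c = k x then B c ++ [x] else B c) := by
  induction C with
  | nil =>
      have hex : B (k x) = [] := hemp (by simp)
      simp [PySem.List.insertBy, hex]
  | cons c Cs ih =>
      have hlt : ∀ c' ∈ Cs, c' < c := fun c' h => (List.pairwise_cons.mp hC).1 c' h
      have hCs : Cs.Pairwise (fun a b => b < a) := (List.pairwise_cons.mp hC).2
      have hBc : ∀ y ∈ B c, k y = c := hB c (List.mem_cons_self)
      rcases lt_trichotomy (k x) c with hxc | hxc | hxc
      · -- k x < c : skip bucket c, recurse
        have hskip : ∀ y ∈ B c, (decide (k y < k x)) = false := by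
          intro y hy; rw [hBc y hy]; simp; omega
        have hmem : (k x ∈ c :: Cs) ↔ (k x ∈ Cs) := by
          constructor
          · intro h; rcases List.mem_cons.mp h with h | h
            · omega
            · exact h
          · exact fun h => List.mem_cons_of_mem _ h
        have hemp' : k x ∉ Cs → B (k x) = [] := fun h => hemp (fun hc => h (hmem.mp hc))
        have ihr := ih hCs (fun c' h => hB c' (List.mem_cons_of_mem _ h))
          (fun c' h => hne c' (List.mem_cons_of_mem _ h)) hemp'
        rw [List.flatMap_cons, insertBy_append_skip _ _ _ _ hskip, ihr]
        by_cases hmemCs : k x ∈ Cs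
        · rw [if_pos hmemCs, if_pos (hmem.mpr hmemCs), List.flatMap_cons,
            if_neg (by omega : ¬ c = k x)]
        · rw [if_neg hmemCs, if_neg (fun h => hmemCs (hmem.mp h))]
          have hhd : PySem.List.insertBy (fun a b => decide (b < a)) (k x) (c :: Cs)
              = c :: PySem.List.insertBy (fun a b => decide (b < a)) (k x) Cs := by
            have hb : (decide (c < k x)) = false := by simp; omega
            simp [PySem.List.insertBy, hb]
          rw [hhd, List.flatMap_cons, if_neg (by omega : ¬ c = k x)]
      · -- k x = c : pass through bucket c, then insert right after it
        have hskip : ∀ y ∈ B c, (decide (k y < k x)) = false := by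
          intro y hy; rw [hBc y hy]; simp; omega
        have hfront : PySem.List.insertBy (fun a b => decide (k b < k a)) x (Cs.flatMap B)
            = x :: Cs.flatMap B := by
          apply insertBy_front
          intro y hy
          have hymem : y ∈ Cs.flatMap B := by
            have := List.head?_eq_some_iff.mp hy
            obtain ⟨t, ht⟩ := this
            rw [ht]; exact List.mem_cons_self
          obtain ⟨c', hc', hyc'⟩ := List.mem_flatMap.mp hymem
          have : k y = c' := hB c' (List.mem_cons_of_mem _ hc') y hyc'
          have := hlt c' hc'
          simp; omega
        rw [List.flatMap_cons, insertBy_append_skip _ _ _ _ hskip, hfront,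
          if_pos (by rw [hxc]; exact List.mem_cons_self), List.flatMap_cons,
          if_pos hxc.symm]
        have hrest : Cs.flatMap (fun c' => if c' = k x then B c' ++ [x] else B c') = Cs.flatMap B := by
          apply flatMap_congr
          intro c' hc'
          rw [if_neg (by have := hlt c' hc'; omega)]
        rw [hrest]
        simp
      · -- c < k x : x goes in front of everything
        have hnotmem : k x ∉ c :: Cs := by
          intro h
          rcases List.mem_cons.mp h with h | h
          · omega
          · have := hlt _ h; omega
        have hex : B (k x) = [] := hemp hnotmem
        have hfront : PySem.List.insertBy (fun a b => decide (k b < k a)) x ((c :: Cs).flatMap B)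
            = x :: (c :: Cs).flatMap B := by
          apply insertBy_front
          intro y hy
          have hymem : y ∈ (c :: Cs).flatMap B := by
            obtain ⟨t, ht⟩ := List.head?_eq_some_iff.mp hy
            rw [ht]; exact List.mem_cons_self
          obtain ⟨c', hc', hyc'⟩ := List.mem_flatMap.mp hymem
          have hk : k y = c' := hB c' hc' y hyc'
          have : c' ≤ c := by
            rcases List.mem_cons.mp hc' with h | h
            · omega
            · have := hlt _ h; omega
          simp; omega
        have hhd : PySem.List.insertBy (fun a b => decide (b < a)) (k x) (c :: Cs)
            = k x :: c :: Cs := by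
          have hb : (decide (c < k x)) = true := by simpa using hxc
          simp [PySem.List.insertBy, hb]
        have hrest : (c :: Cs).flatMap (fun c' => if c' = k x then B c' ++ [x] else B c')
            = (c :: Cs).flatMap B := by
          apply flatMap_congr
          intro c' hc'
          rcases List.mem_cons.mp hc' with h | h
          · rw [if_neg (by omega)]
          · rw [if_neg (by have := hlt _ h; omega)]
        rw [if_neg hnotmem, hhd]
        conv_rhs => rw [List.flatMap_cons]
        rw [if_pos rfl, hex, hrest, hfront]
        simp

-- stable descending sort = concatenation, over descending distinct keys, of the key-buckets
theorem stable_sort_buckets {α : Type} (l : List α) (k : α → Int) :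
    PySem.List.sorted l k true
      = (PySem.List.sorted (PySem.List.dedup (l.map k)) (fun c => c) true).flatMap
          (fun c => l.filter (fun x => k x == c)) := by
  induction l using List.reverseRecOn with
  | nil => simp [PySem.List.sorted_rev_eq_foldl_insertBy]
  | append_singleton l x ih =>
      have hC := PySem.List.sorted_pairwise_rev (PySem.List.dedup (l.map k)) (fun c => c)
      have hCnodup : (PySem.List.sorted (PySem.List.dedup (l.map k)) (fun c => c) true).Nodup :=
        (PySem.List.sorted_perm _ _ _).nodup_iff.mpr (PySem.List.nodup_dedup _)
      have hCgt : (PySem.List.sorted (PySem.List.dedup (l.map k)) (fun c => c) true).Pairwise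
          (fun a b => b < a) :=
        (hC.and hCnodup).imp (fun h => lt_of_le_of_ne h.1 (Ne.symm h.2))
      set C := PySem.List.sorted (PySem.List.dedup (l.map k)) (fun c => c) true with hCdef
      have hmemC : ∀ c : Int, c ∈ C ↔ c ∈ l.map k := by
        intro c
        rw [hCdef, PySem.List.mem_sorted, PySem.List.mem_dedup]
      have hlhs : PySem.List.sorted (l ++ [x]) k true
          = PySem.List.insertBy (fun a b => decide (k b < k a)) x (PySem.List.sorted l k true) := by
        rw [PySem.List.sorted_rev_eq_foldl_insertBy, PySem.List.sorted_rev_eq_foldl_insertBy,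
          List.foldl_append]
        rfl
      rw [hlhs, ih]
      rw [insertBy_flatMap k x C hCgt _
        (fun c _ y hy => by
          have := List.mem_filter.mp hy
          exact beq_iff_eq.mp this.2)
        (fun c hc => by
          obtain ⟨a, ha, hak⟩ := List.mem_map.mp ((hmemC c).mp hc)
          intro hnil
          have : a ∈ l.filter (fun x => k x == c) :=
            List.mem_filter.mpr ⟨ha, beq_iff_eq.mpr hak⟩
          rw [hnil] at this
          exact absurd this (List.not_mem_nil))
        (fun hn => by
          rw [List.filter_eq_nil_iff]
          intro a ha hc
          exact hn ((hmemC (k x)).mpr (List.mem_map.mpr ⟨a, ha, beq_iff_eq.mp hc⟩)))]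
      -- now identify the RHS shape for l ++ [x]
      have hmap : (l ++ [x]).map k = l.map k ++ [k x] := by simp
      by_cases hmem : k x ∈ C
      · have hC2 : PySem.List.sorted (PySem.List.dedup ((l ++ [x]).map k)) (fun c => c) true = C := by
          rw [hmap, PySem.List.dedup_eq_ofList, PySem.Set.ofList_append_singleton]
          have hct : (PySem.Set.ofList (l.map k)).contains (k x) = true := by
            have hm : k x ∈ PySem.Set.ofList (l.map k) :=
              (PySem.Set.mem_ofList _ _).mpr ((hmemC (k x)).mp hmem)
            simpa only [PySem.Set.contains, List.contains_iff_mem] using hm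
          rw [PySem.Set.add, if_pos hct, hCdef, PySem.List.dedup_eq_ofList]
        rw [hC2, if_pos hmem]
        apply flatMap_congr
        intro c _
        rw [List.filter_append]
        by_cases hcx : c = k x
        · rw [if_pos hcx]
          have : [x].filter (fun y => k y == c) = [x] := by simp [hcx]
          rw [this]
        · rw [if_neg hcx]
          have hfx : (k x == c) = false := beq_eq_false_iff_ne.mpr (fun h => hcx h.symm)
          have : [x].filter (fun y => k y == c) = [] := by
            simp [hfx]
          rw [this, List.append_nil]
      · have hct : (PySem.Set.ofList (l.map k)).contains (k x) = false := by
          simp only [PySem.Set.contains]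
          rw [Bool.eq_false_iff]
          intro hc
          rw [List.contains_iff_mem] at hc
          exact hmem ((hmemC (k x)).mpr ((PySem.Set.mem_ofList _ _).mp hc))
        have hC2 : PySem.List.sorted (PySem.List.dedup ((l ++ [x]).map k)) (fun c => c) true
            = PySem.List.insertBy (fun a b => decide (b < a)) (k x) C := by
          rw [hmap, PySem.List.dedup_eq_ofList, PySem.Set.ofList_append_singleton,
            PySem.Set.add, if_neg (by rw [hct]; simp)]
          rw [PySem.List.sorted_rev_eq_foldl_insertBy, List.foldl_append]
          simp only [List.foldl_cons, List.foldl_nil]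
          rw [hCdef, PySem.List.dedup_eq_ofList, PySem.List.sorted_rev_eq_foldl_insertBy]
        rw [hC2, if_neg hmem]
        apply flatMap_congr
        intro c _
        rw [List.filter_append]
        by_cases hcx : c = k x
        · rw [if_pos hcx]
          have : [x].filter (fun y => k y == c) = [x] := by simp [hcx]
          rw [this]
        · rw [if_neg hcx]
          have hfx : (k x == c) = false := beq_eq_false_iff_ne.mpr (fun h => hcx h.symm)
          have : [x].filter (fun y => k y == c) = [] := by
            simp [hfx]
          rw [this, List.append_nil]

-- the rank-counter fold is an enumerate fold
theorem rank_fold (l : List Int) (d : PySem.Dict Int Int) (r : Int) :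
    l.foldl (fun (st : PySem.Dict Int Int × Int) pid => (st.1.insert pid st.2, st.2 + 1)) (d, r)
      = ((PySem.List.enumerate l r).foldl (fun d ip => d.insert ip.2 ip.1) d, r + l.length) := by
  induction l generalizing d r with
  | nil => simp [PySem.List.enumerate]
  | cons p l ih =>
      rw [List.foldl_cons, PySem.List.enumerate_cons, List.foldl_cons, ih]
      congr 1
      simp only [List.length_cons]
      push_cast
      ring

-- per-prefix: A's most_common ranking dict equals B's bucket ranking dict (same items)
theorem inner_eq (c : PySem.Dict Int Int) (h : c.keys.Nodup) :
    ((PySem.List.enumerate (PySem.List.sorted c.items (fun p => p.2) true) 1).foldl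
        (fun d ip => d.insert ip.2.1 ip.1) PySem.Dict.empty).items
      = (((PySem.List.sorted
              (c.items.foldl (fun b pc => b.modify pc.2 [] (fun g => g ++ [pc.1]))
                PySem.Dict.empty).keys (fun x => x) true).foldl
            (fun (st : PySem.Dict Int Int × Int) cnt =>
              ((c.items.foldl (fun b pc => b.modify pc.2 [] (fun g => g ++ [pc.1]))
                  PySem.Dict.empty).getD cnt []).foldl
                (fun st pid => (st.1.insert pid st.2, st.2 + 1)) st)
            (PySem.Dict.empty, 1)).1).items := by
  set S := PySem.List.sorted c.items (fun p => p.2) true with hSdef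
  have hkeys_eq : c.keys = c.items.map (fun p => p.1) := rfl
  have hSfst_nodup : (S.map (fun p => p.1)).Nodup := by
    have hperm : S.Perm c.items := PySem.List.sorted_perm _ _ _
    exact ((hperm.map (fun p => p.1)).nodup_iff).mpr (hkeys_eq ▸ h)
  -- LHS
  have hLnodup : ((PySem.List.enumerate S 1).map (fun ip => ip.2.1)).Nodup := by
    have : (PySem.List.enumerate S 1).map (fun ip => ip.2.1)
        = ((PySem.List.enumerate S 1).map (fun ip => ip.2)).map (fun p => p.1) := by
      rw [List.map_map]; rfl
    rw [this, PySem.List.map_snd_enumerate]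
    exact hSfst_nodup
  have hL : ((PySem.List.enumerate S 1).foldl
        (fun d ip => d.insert ip.2.1 ip.1) PySem.Dict.empty).items
      = (PySem.List.enumerate S 1).map (fun ip => (ip.2.1, ip.1)) := by
    simpa using PySem.Dict.items_foldl_insert_fresh (PySem.List.enumerate S 1)
      (fun ip => ip.2.1) (fun ip => ip.1) PySem.Dict.empty
      (fun a _ => PySem.Dict.contains_empty a.2.1) hLnodup
  -- buckets
  have hbfold : c.items.foldl (fun b pc => b.modify pc.2 [] (fun g => g ++ [pc.1])) PySem.Dict.empty
      = (c.items.map (fun pc => (pc.2, pc.1))).foldl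
          (fun b e => b.modify e.1 [] (fun g => g ++ [e.2])) PySem.Dict.empty := by
    rw [List.foldl_map]
  set buckets := c.items.foldl (fun b pc => b.modify pc.2 [] (fun g => g ++ [pc.1]))
    PySem.Dict.empty with hBdef
  have hbkeys : buckets.keys = PySem.List.dedup (c.items.map (fun p => p.2)) := by
    have := PySem.Dict.keys_foldl_modify_key c.items (fun pc => pc.2) ([] : List Int)
      (fun _ pc => fun g => g ++ [pc.1]) PySem.Dict.empty
    rw [this]
    have hek : (PySem.Dict.empty : PySem.Dict Int (List Int)).keys = [] := rfl
    rw [hek, PySem.List.dedup_eq_ofList, PySem.Set.ofList_eq_foldl]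
    rfl
  have hbgetD : ∀ cnt : Int, buckets.getD cnt []
      = (c.items.filter (fun pc => pc.2 == cnt)).map (fun pc => pc.1) := by
    intro cnt
    rw [hbfold]
    rw [PySem.Dict.getD_foldl_modify_append (c.items.map (fun pc => (pc.2, pc.1)))
      PySem.Dict.empty cnt]
    rw [List.filter_map, List.map_map]
    simp [PySem.Dict.getD_empty, Function.comp_def]
  -- flatten the nested fold
  have hflat : (PySem.List.sorted buckets.keys (fun x => x) true).foldl
        (fun (st : PySem.Dict Int Int × Int) cnt =>
          (buckets.getD cnt []).foldl (fun st pid => (st.1.insert pid st.2, st.2 + 1)) st)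
        (PySem.Dict.empty, 1)
      = ((PySem.List.sorted buckets.keys (fun x => x) true).flatMap
          (fun cnt => buckets.getD cnt [])).foldl
          (fun (st : PySem.Dict Int Int × Int) pid => (st.1.insert pid st.2, st.2 + 1))
          (PySem.Dict.empty, 1) := by
    rw [List.foldl_flatMap]
  have hflatlist : (PySem.List.sorted buckets.keys (fun x => x) true).flatMap
        (fun cnt => buckets.getD cnt []) = S.map (fun p => p.1) := by
    rw [hbkeys]
    have hb := stable_sort_buckets c.items (fun p => p.2)
    rw [hSdef, hb, List.map_flatMap]
    apply flatMap_congr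
    intro cnt _
    rw [hbgetD cnt]
  rw [hL, hflat, hflatlist, rank_fold]
  have hflatnodup : (S.map (fun p => p.1)).Nodup := hSfst_nodup
  have hR : ((PySem.List.enumerate (S.map (fun p => p.1)) 1).foldl
        (fun d ip => d.insert ip.2 ip.1) PySem.Dict.empty).items
      = (PySem.List.enumerate (S.map (fun p => p.1)) 1).map (fun ip => (ip.2, ip.1)) := by
    simpa using PySem.Dict.items_foldl_insert_fresh (PySem.List.enumerate (S.map (fun p => p.1)) 1)
      (fun ip => ip.2) (fun ip => ip.1) PySem.Dict.empty
      (fun a _ => PySem.Dict.contains_empty a.2)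
      (by rw [PySem.List.map_snd_enumerate]; exact hflatnodup)
  rw [hR, enumerate_map, List.map_map]
  rfl

-- main equivalence
theorem calc_mpc_eq (queries : List (String × List Int)) :
    calc_mpc queries = calc_mpc_alt queries := by
  simp only [calc_mpc, calc_mpc_alt]
  set E := pvEvents queries with hEdef
  set bucketsE : PySem.Dict String (List (List Int)) :=
    E.foldl (fun b e => b.modify e.1 [] (fun g => g ++ [e.2])) PySem.Dict.empty with hBdef
  have hvotes : queries.foldl (fun votes qp =>
      (PySem.List.pyRange 0 (PySem.Str.len qp.1) 1).foldl (fun votes i =>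
        votes.modify (PySem.Str.slice qp.1 none (some (i + 1))) PySem.Dict.empty
          (fun c => qp.2.foldl (fun c p => c.modify p 0 (· + 1)) c)) votes)
      PySem.Dict.empty = pvMapVal pvCnt bucketsE := by
    rw [hBdef, ← mapVal_cnt_foldl, hEdef, pvEvents, List.foldl_flatMap]
    simp only [List.foldl_map]
    rfl
  rw [hvotes]
  have hbn : bucketsE.keys.Nodup :=
    PySem.Dict.nodup_keys_foldl_modify_key E (fun e => e.1) [] (fun _ e => fun g => g ++ [e.2])
      PySem.Dict.empty PySem.Dict.nodup_keys_empty
  have hvn : ((pvMapVal pvCnt bucketsE).items.map (fun p => p.1)).Nodup := by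
    have h := hbn
    rw [← pvMapVal_keys pvCnt bucketsE] at h
    simpa [PySem.Dict.keys] using h
  rw [foldl_insert_items _ _ hvn]
  -- A is now a map over bucketsE's items
  have hAitems : (pvMapVal pvCnt bucketsE).items
      = bucketsE.keys.map (fun p => (p, pvCnt (bucketsE.getD p []))) := by
    show (bucketsE.items.map (fun p => (p.1, pvCnt p.2))) = _
    rw [PySem.Dict.items_eq_map_keys bucketsE hbn [], List.map_map]
    rfl
  rw [hAitems]
  -- B's prefix list is bucketsE's key list
  have hprefixes : PySem.List.dedup (queries.flatMap (fun qp =>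
      (PySem.List.pyRange 0 (PySem.Str.len qp.1) 1).map
        (fun i => PySem.Str.slice qp.1 none (some (i + 1)))))
      = PySem.List.dedup (E.map (fun e => e.1)) := by
    rw [hEdef, pvEvents, List.map_flatMap]
    simp only [List.map_map]
    rfl
  have hEkeys : bucketsE.keys = PySem.List.dedup (E.map (fun e => e.1)) := by
    rw [hBdef]
    rw [PySem.Dict.keys_foldl_modify_key E (fun e => e.1) ([] : List (List Int))
      (fun _ e => fun g => g ++ [e.2]) PySem.Dict.empty]
    have hek : (PySem.Dict.empty : PySem.Dict String (List (List Int))).keys = [] := rfl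
    rw [hek, PySem.List.dedup_eq_ofList, PySem.Set.ofList_eq_foldl]
    rfl
  rw [hprefixes, ← hEkeys]
  rw [foldl_insert_items_key]
  · simp only [List.map_map]
    apply List.map_congr_left
    intro pfx hpfx
    have hne : pfx.toList ≠ [] := mem_prefixes_ne queries pfx (by rw [← hEkeys]; exact hpfx)
    have hc := counts_eq queries pfx hne
    have hgetD : bucketsE.getD pfx [] = ((E.filter (fun e => e.1 == pfx)).map (fun e => e.2)) := by
      rw [hBdef, PySem.Dict.getD_foldl_modify_append E PySem.Dict.empty pfx]
      simp [PySem.Dict.getD_empty]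
    simp only [Function.comp_def]
    rw [hc, hgetD]
    exact congrArg (fun z => (pfx, z)) (inner_eq _ (cnt_keys_nodup _))
  · exact hbn

-- ===== VERDICT (by name: the statement is the Claim_ definition above) =====
theorem calc_mpc_spec : Claim_equal_calc_mpc := by
  intro queries _
  unfold Spec_calc_mpc
  exact calc_mpc_eq queries
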